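-- pv_equiv track=rewrite | github.com/facebook/rocksdb | tools/c_api_gen/validate_generated_equivalence.py | find_signature_start
-- ===== SOURCE A (Python) =====
-- def find_signature_start(text: str, pos: int) -> int:
--     start = text.rfind("\n", 0, pos)
--     start = 0 if start < 0 else start + 1
--     while start > 0:
--         prev_end = start - 1
--         prev_start = text.rfind("\n", 0, prev_end)
--         prev_start = 0 if prev_start < 0 else prev_start + 1
--         prev_line = text[prev_start:prev_end].strip()
--         if not prev_line:
--             break
--         if prev_line.startswith("//"):
--             break
--         if prev_line.endswith(";") or prev_line.endswith("}") or prev_line.endswith("{"):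
--             break
--         start = prev_start
--     return start
-- ===== SOURCE B (Python) =====
-- def find_signature_start(text: str, pos: int) -> int:
--     # One forward pass over the line structure: the signature starts at the
--     # beginning of the current run of "continuation" lines.  Scan lines from the
--     # top, keeping the start offset of the current candidate segment; every
--     # boundary line (blank, //-comment, or ending in ';', '}', '{') resets the
--     # candidate to the start of the following line.  Stop at the line containing
--     # pos, whose start offset is found with a single rfind.
--     nl = text.rfind("\n", 0, pos)
--     start = nl + 1 if nl >= 0 else 0
--     candidate = 0
--     cur = 0
--     for line in text.split("\n"):
--         if cur >= start:
--             break
--         s = line.strip()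
--         if not s or s.startswith("//") or s.endswith((";", "}", "{")):
--             candidate = cur + len(line) + 1
--         cur += len(line) + 1
--     return candidate
-- ===== Notes on version B (the rewrite author's own statement) =====
-- stated objective: alternative
-- what changed: B replaces A's repeated backward rfind walk with one rfind to locate the current line start followed by a single forward pass over the newline-split lines that tracks the start of the current candidate segment, resetting it after every boundary line.
import Mathlib
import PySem

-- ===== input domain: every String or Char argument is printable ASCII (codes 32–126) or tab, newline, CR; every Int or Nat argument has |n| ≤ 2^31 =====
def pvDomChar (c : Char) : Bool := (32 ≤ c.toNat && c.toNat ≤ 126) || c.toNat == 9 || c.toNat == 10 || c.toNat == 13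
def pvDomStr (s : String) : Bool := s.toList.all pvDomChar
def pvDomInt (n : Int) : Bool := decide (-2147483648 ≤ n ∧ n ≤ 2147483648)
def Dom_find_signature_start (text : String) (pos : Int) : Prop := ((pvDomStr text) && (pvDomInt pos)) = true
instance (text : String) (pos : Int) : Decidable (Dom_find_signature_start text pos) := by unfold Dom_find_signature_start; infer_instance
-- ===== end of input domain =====

-- B replaces A's repeated backward rfind walk by one rfind for the current line start plus a
-- forward pass over split("\n") tracking the current candidate segment (objective: alternative).


-- ===== PORT A =====

-- exact port of text.rfind("\n", 0, e) for an already slice-normalized end bound e (0 ≤ e ≤ len):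
-- the highest index < e holding '\n', else -1
def pvRfindNl : List Char → Nat → Int
  | _, 0 => -1
  | [], _ + 1 => -1
  | c :: cs, e + 1 =>
      let r := pvRfindNl cs e
      if 0 ≤ r then r + 1 else if c = '\n' then 0 else -1

-- exact port of text.rfind("\n", 0, pos) for an arbitrary int pos: Python's slice-end
-- normalization (negative from the right, clamped to [0, len]) then the backward scan
def pvRfind (cs : List Char) (pos : Int) : Int :=
  pvRfindNl cs ((if pos < 0 then max (pos + cs.length) 0 else min pos cs.length).toNat)

theorem pvRfindNl_lt : ∀ (cs : List Char) (e : Nat), pvRfindNl cs e < (e : Int)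
  | _, 0 => by simp [pvRfindNl]
  | [], e + 1 => by simp [pvRfindNl]
  | c :: cs, e + 1 => by
      have ih := pvRfindNl_lt cs e
      simp only [pvRfindNl]
      split_ifs <;> push_cast <;> omega

-- the while-loop of A; start decreases strictly, so this is the loop verbatim
def pvLoopA (cs : List Char) (start : Nat) : Nat :=
  if h : 0 < start then
    let prev_end := start - 1
    let r := pvRfindNl cs prev_end
    let prev_start : Nat := if r < 0 then 0 else r.toNat + 1
    let prev_line := PySem.Chars.strip ((cs.take prev_end).drop prev_start)
    if prev_line = [] then start
    else if PySem.Chars.startswith prev_line ['/', '/'] then start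
    else if PySem.Chars.endswith prev_line [';'] ∨ PySem.Chars.endswith prev_line ['}'] ∨
            PySem.Chars.endswith prev_line ['{'] then start
    else pvLoopA cs prev_start
  else start
termination_by start
decreasing_by
  have := pvRfindNl_lt cs (start - 1)
  split_ifs <;> omega

def find_signature_start (text : String) (pos : Int) : Int :=
  let cs := text.toList
  let r := pvRfind cs pos
  let start : Nat := if r < 0 then 0 else r.toNat + 1
  (pvLoopA cs start : Int)

-- ===== PORT B =====

-- exact port of text.split("\n")
def pvSplitNl : List Char → List (List Char)
  | [] => [[]]
  | c :: cs =>
      if c = '\n' then [] :: pvSplitNl cs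
      else
        match pvSplitNl cs with
        | [] => [[c]]
        | l :: ls => (c :: l) :: ls

-- the for-loop of B: cur = start offset of the scanned line, cand = current candidate;
-- stop once the start offset of the line containing pos is reached
def pvLoopB (start : Nat) : List (List Char) → Nat → Nat → Nat
  | [], _, cand => cand
  | l :: rest, cur, cand =>
      if start ≤ cur then cand
      else
        let s := PySem.Chars.strip l
        pvLoopB start rest (cur + l.length + 1)
          (if s.isEmpty || PySem.Chars.startswith s ['/', '/'] || PySem.Chars.endswith s [';'] ||
              PySem.Chars.endswith s ['}'] || PySem.Chars.endswith s ['{'] then cur + l.length + 1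
           else cand)

def find_signature_start_alt (text : String) (pos : Int) : Int :=
  let cs := text.toList
  let nl := pvRfind cs pos
  let start : Nat := if 0 ≤ nl then nl.toNat + 1 else 0
  (pvLoopB start (pvSplitNl cs) 0 0 : Int)

-- ===== PRECONDITION & SPEC =====
def Spec_find_signature_start (text : String) (pos : Int) (out : Int) : Prop := out = find_signature_start_alt text pos
instance (text : String) (pos : Int) (out : Int) : Decidable (Spec_find_signature_start text pos out) := by unfold Spec_find_signature_start; infer_instance

-- ===== CLAIM (what is proved, stated in full; the proofs are below) =====
def Claim_equal_find_signature_start : Prop := ∀ (text : String) (pos : Int), Dom_find_signature_start text pos → Spec_find_signature_start text pos (find_signature_start text pos)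

-- ===== LEMMAS AND PROOFS =====

-- the boundary test on an already-stripped line
def pvBdryS (s : List Char) : Bool :=
  s.isEmpty || PySem.Chars.startswith s ['/', '/'] || PySem.Chars.endswith s [';'] ||
    PySem.Chars.endswith s ['}'] || PySem.Chars.endswith s ['{']

def pvBdry (l : List Char) : Bool := pvBdryS (PySem.Chars.strip l)

-- A's start-of-line computation from the rfind result
def pvStart (cs : List Char) (e : Nat) : Nat :=
  if pvRfindNl cs e < 0 then 0 else (pvRfindNl cs e).toNat + 1

theorem pvRfindNl_ge : ∀ (cs : List Char) (e : Nat), -1 ≤ pvRfindNl cs e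
  | _, 0 => by simp [pvRfindNl]
  | [], e + 1 => by simp [pvRfindNl]
  | c :: cs, e + 1 => by
      have ih := pvRfindNl_ge cs e
      simp only [pvRfindNl]
      split_ifs <;> omega

theorem pvRfindNl_take : ∀ (cs ds : List Char) (e : Nat), cs.take e = ds.take e →
    pvRfindNl cs e = pvRfindNl ds e
  | _, _, 0, _ => by simp [pvRfindNl]
  | [], ds, e + 1, h => by
      have : ds = [] := by
        cases ds with
        | nil => rfl
        | cons d ds => simp [List.take] at h
      subst this; rfl
  | c :: cs, ds, e + 1, h => by
      cases ds with
      | nil => simp [List.take] at h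
      | cons d ds =>
          simp only [List.take, List.cons.injEq] at h
          obtain ⟨rfl, h2⟩ := h
          simp only [pvRfindNl, pvRfindNl_take cs ds e h2]

theorem pvRfindNl_no_nl : ∀ (cs : List Char) (e : Nat), '\n' ∉ cs → pvRfindNl cs e = -1
  | _, 0, _ => by simp [pvRfindNl]
  | [], e + 1, _ => by simp [pvRfindNl]
  | c :: cs, e + 1, h => by
      have hc : ¬ c = '\n' := fun hc => h (hc ▸ List.mem_cons_self)
      have ih := pvRfindNl_no_nl cs e (fun hm => h (List.mem_cons_of_mem _ hm))
      simp [pvRfindNl, ih, hc]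

theorem pvRfindNl_append : ∀ (l : List Char) (rest : List Char) (k : Nat), '\n' ∉ l →
    pvRfindNl (l ++ '\n' :: rest) (l.length + 1 + k) =
      if 0 ≤ pvRfindNl rest k then (l.length : Int) + 1 + pvRfindNl rest k else (l.length : Int)
  | [], rest, k, _ => by
      have hk : ([] : List Char).length + 1 + k = k + 1 := by simp; omega
      rw [hk]
      simp only [List.nil_append, pvRfindNl]
      split_ifs <;> simp <;> omega
  | c :: l, rest, k, h => by
      have hc : ¬ c = '\n' := fun hc => h (hc ▸ List.mem_cons_self)
      have ih := pvRfindNl_append l rest k (fun hm => h (List.mem_cons_of_mem _ hm))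
      have hlen : (c :: l).length + 1 + k = (l.length + 1 + k) + 1 := by simp; omega
      rw [hlen]
      simp only [List.cons_append, pvRfindNl, ih]
      have hge := pvRfindNl_ge rest k
      split_ifs <;> push_cast <;> omega

theorem pvSplitNl_no_nl : ∀ (cs : List Char), '\n' ∉ cs → pvSplitNl cs = [cs]
  | [], _ => rfl
  | c :: cs, h => by
      have hc : ¬ c = '\n' := fun hc => h (hc ▸ List.mem_cons_self)
      have ih := pvSplitNl_no_nl cs (fun hm => h (List.mem_cons_of_mem _ hm))
      simp [pvSplitNl, hc, ih]

theorem pvSplitNl_append : ∀ (l : List Char) (rest : List Char), '\n' ∉ l →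
    pvSplitNl (l ++ '\n' :: rest) = l :: pvSplitNl rest
  | [], rest, _ => by simp [pvSplitNl]
  | c :: l, rest, h => by
      have hc : ¬ c = '\n' := fun hc => h (hc ▸ List.mem_cons_self)
      have ih := pvSplitNl_append l rest (fun hm => h (List.mem_cons_of_mem _ hm))
      simp [pvSplitNl, hc, ih]

theorem pvExistsFirstNl : ∀ (cs : List Char), '\n' ∈ cs →
    ∃ l rest, cs = l ++ '\n' :: rest ∧ '\n' ∉ l
  | [], h => absurd h (List.not_mem_nil)
  | c :: cs, h => by
      by_cases hc : c = '\n'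
      · exact ⟨[], cs, by simp [hc], by simp⟩
      · have hm : '\n' ∈ cs := by
          rcases List.mem_cons.mp h with h1 | h2
          · exact absurd h1.symm hc
          · exact h2
        obtain ⟨l, rest, heq, hnl⟩ := pvExistsFirstNl cs hm
        refine ⟨c :: l, rest, by simp [heq], ?_⟩
        simp only [List.mem_cons, not_or]
        exact ⟨fun hx => hc hx.symm, hnl⟩

theorem pvLoopA_zero (cs : List Char) : pvLoopA cs 0 = 0 := by
  rw [pvLoopA]; simp

theorem pvTakeDrop (l rest : List Char) (k p : Nat) :
    ((l ++ '\n' :: rest).take (l.length + 1 + k)).drop (l.length + 1 + p) = (rest.take k).drop p := by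
  have h1 : l.length + 1 + k = l.length + (1 + k) := by omega
  have h2 : l.length + 1 + p = l.length + (1 + p) := by omega
  rw [h1, h2, List.take_append, List.drop_append]
  simp [Nat.add_comm 1 k, Nat.add_comm 1 p, List.take_succ_cons, List.drop_succ_cons]

-- A's if-cascade is a single boundary test
theorem pvLoopA_eq (cs : List Char) (start : Nat) (h : 0 < start) :
    pvLoopA cs start =
      if pvBdry ((cs.take (start - 1)).drop (pvStart cs (start - 1))) then start
      else pvLoopA cs (pvStart cs (start - 1)) := by
  conv_lhs => rw [pvLoopA]
  rw [dif_pos h]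
  simp only [pvStart, pvBdry, pvBdryS]
  set ln := PySem.Chars.strip ((cs.take (start - 1)).drop
    (if pvRfindNl cs (start - 1) < 0 then 0 else (pvRfindNl cs (start - 1)).toNat + 1)) with hln
  by_cases h1 : ln = [] <;>
    by_cases h2 : PySem.Chars.startswith ln ['/', '/'] = true <;>
    by_cases h3 : PySem.Chars.endswith ln [';'] = true <;>
    by_cases h4 : PySem.Chars.endswith ln ['}'] = true <;>
    by_cases h5 : PySem.Chars.endswith ln ['{'] = true <;>
    simp_all [List.isEmpty_iff]

-- the rfind result at a shifted prev_end, as A's prev_start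
theorem pvStart_append (l rest : List Char) (k : Nat) (hl : '\n' ∉ l) :
    pvStart (l ++ '\n' :: rest) (l.length + 1 + k) = l.length + 1 + pvStart rest k := by
  have hge := pvRfindNl_ge rest k
  simp only [pvStart, pvRfindNl_append l rest k hl]
  split_ifs <;> push_cast <;> omega

-- backward walk shifted past the first line
theorem pvAshift : ∀ (s : Nat) (l rest : List Char), '\n' ∉ l →
    pvLoopA (l ++ '\n' :: rest) (l.length + 1 + s) =
      if pvLoopA rest s = 0 then (if pvBdry l then l.length + 1 else 0)
      else l.length + 1 + pvLoopA rest s := by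
  intro s
  induction s using Nat.strong_induction_on with
  | _ s ih =>
    intro l rest hl
    cases s with
    | zero =>
      rw [pvLoopA_eq _ _ (by omega)]
      have h1 : l.length + 1 + 0 - 1 = l.length := by omega
      have h2 : pvRfindNl (l ++ '\n' :: rest) l.length = -1 := by
        rw [pvRfindNl_take (l ++ '\n' :: rest) l l.length (by simp)]
        exact pvRfindNl_no_nl l l.length hl
      have h3 : pvStart (l ++ '\n' :: rest) l.length = 0 := by simp [pvStart, h2]
      have h4 : ((l ++ '\n' :: rest).take l.length).drop 0 = l := by simp
      rw [h1, h3, h4, pvLoopA_zero, pvLoopA_zero]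
      split_ifs <;> omega
    | succ k =>
      have hlt : pvStart rest k < k + 1 := by
        have := pvRfindNl_lt rest k
        have := pvRfindNl_ge rest k
        simp only [pvStart]; split_ifs <;> omega
      have h1 : l.length + 1 + (k + 1) - 1 = l.length + 1 + k := by omega
      have hline : ((l ++ '\n' :: rest).take (l.length + 1 + k)).drop
          (pvStart (l ++ '\n' :: rest) (l.length + 1 + k)) = (rest.take k).drop (pvStart rest k) := by
        rw [pvStart_append l rest k hl, pvTakeDrop]
      rw [pvLoopA_eq _ _ (by omega), h1, hline]
      conv_rhs => rw [pvLoopA_eq rest (k + 1) (by omega)]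
      have h2 : k + 1 - 1 = k := by omega
      rw [h2]
      by_cases hb : pvBdry ((rest.take k).drop (pvStart rest k)) = true
      · simp only [if_pos hb]
        rw [if_neg (by omega : ¬ k + 1 = 0)]
      · simp only [if_neg hb, pvStart_append l rest k hl]
        exact ih (pvStart rest k) hlt l rest hl

theorem pvLoopB_cons (start : Nat) (l : List Char) (rest : List (List Char)) (cur cand : Nat) :
    pvLoopB start (l :: rest) cur cand =
      if start ≤ cur then cand
      else pvLoopB start rest (cur + l.length + 1) (if pvBdry l then cur + l.length + 1 else cand) := rfl

-- main bridge: the forward pass up to the current line start computes A's backward walk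
theorem pvMain : ∀ (N : Nat) (cs : List Char), cs.length ≤ N → ∀ (e δ cand : Nat), e ≤ cs.length →
    pvLoopB (δ + pvStart cs e) (pvSplitNl cs) δ cand =
      if pvLoopA cs (pvStart cs e) = 0 then cand else δ + pvLoopA cs (pvStart cs e) := by
  intro N
  induction N using Nat.strong_induction_on with
  | _ N ih =>
    intro cs hN e δ cand he
    by_cases hnl : '\n' ∈ cs
    · obtain ⟨l, rest, rfl, hl⟩ := pvExistsFirstNl cs hnl
      rw [pvSplitNl_append l rest hl]
      by_cases hek : l.length + 1 ≤ e
      · obtain ⟨k, rfl⟩ : ∃ k, e = l.length + 1 + k := ⟨e - (l.length + 1), by omega⟩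
        have hkr : k ≤ rest.length := by
          simp only [List.length_append, List.length_cons] at he; omega
        have hrN : rest.length < N := by
          simp only [List.length_append, List.length_cons] at hN; omega
        rw [pvStart_append l rest k hl, pvLoopB_cons, if_neg (by omega)]
        have harr1 : δ + (l.length + 1 + pvStart rest k) = (δ + l.length + 1) + pvStart rest k := by
          omega
        rw [harr1, ih rest.length hrN rest le_rfl k (δ + l.length + 1)
          (if pvBdry l then δ + l.length + 1 else cand) hkr]
        rw [pvAshift (pvStart rest k) l rest hl]
        split_ifs <;> first | rfl | omega | simp_all
      · have he' : e ≤ l.length := by omega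
        have h2 : pvRfindNl (l ++ '\n' :: rest) e = -1 := by
          rw [pvRfindNl_take (l ++ '\n' :: rest) l e
            (by rw [List.take_append_of_le_length he'])]
          exact pvRfindNl_no_nl l e hl
        rw [show pvStart (l ++ '\n' :: rest) e = 0 by simp [pvStart, h2], pvLoopA_zero,
          pvLoopB_cons, if_pos (by omega), if_pos rfl]
    · rw [pvSplitNl_no_nl cs hnl,
        show pvStart cs e = 0 by simp [pvStart, pvRfindNl_no_nl cs e hnl], pvLoopA_zero,
        pvLoopB_cons, if_pos (by omega), if_pos rfl]

-- ===== VERDICT (by name: the statement is the Claim_ definition above) =====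
theorem find_signature_start_spec : Claim_equal_find_signature_start := by
  intro text pos _
  show find_signature_start text pos = find_signature_start_alt text pos
  unfold find_signature_start find_signature_start_alt pvRfind
  simp only []
  set cs := text.toList with hcs
  set e : Nat := (if pos < 0 then max (pos + (cs.length : Int)) 0 else min pos (cs.length : Int)).toNat with hee
  have he : e ≤ cs.length := by rw [hee]; split_ifs <;> omega
  have hge := pvRfindNl_ge cs e
  have hstartB : (if 0 ≤ pvRfindNl cs e then (pvRfindNl cs e).toNat + 1 else 0) = pvStart cs e := by
    simp only [pvStart]; split_ifs <;> omega
  have hstartA : (if pvRfindNl cs e < 0 then 0 else (pvRfindNl cs e).toNat + 1) = pvStart cs e := by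
    simp only [pvStart]
  rw [hstartA, hstartB]
  have h := pvMain cs.length cs le_rfl e 0 0 he
  simp only [Nat.zero_add] at h
  rw [h]
  split_ifs with h0 <;> simp [h0]
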